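-- pv_equiv track=rewrite | github.com/bartpiel/Community-AI-Governance-Research | Wikipedia/wikipedia_specific_governance_analyzer.py | categorize_governance_page
-- ===== SOURCE A (Python) =====
-- def categorize_governance_page(page_title):
--     """Categorize the type of governance page"""
--     title_lower = page_title.lower()
--
--     if 'policy' in title_lower or page_title in ['Wikipedia:Five pillars', 'Wikipedia:What Wikipedia is not']:
--         return 'Policy'
--     elif 'guideline' in title_lower or any(term in title_lower for term in ['manual of style', 'reliable sources', 'notability']):
--         return 'Guideline'
--     elif 'bot' in title_lower or 'automated' in title_lower:
--         return 'Bot/Automation Policy'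
--     elif 'essay' in title_lower or page_title in ['Wikipedia:Ignore all rules', 'Wikipedia:Be bold']:
--         return 'Essay'
--     elif any(term in title_lower for term in ['help', 'village pump', 'teahouse']):
--         return 'Help/Community Page'
--     elif 'arbitration' in title_lower or 'administrator' in title_lower:
--         return 'Administrative Page'
--     elif 'wikiproject' in title_lower or 'assessment' in title_lower:
--         return 'Project/Assessment Page'
--     else:
--         return 'Information Page'
-- ===== SOURCE B (Python) =====
-- _KEYWORD_PRIORITY = {
--     'policy': 0,
--     'guideline': 1, 'manual of style': 1, 'reliable sources': 1, 'notability': 1,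
--     'bot': 2, 'automated': 2,
--     'essay': 3,
--     'help': 4, 'village pump': 4, 'teahouse': 4,
--     'arbitration': 5, 'administrator': 5,
--     'wikiproject': 6, 'assessment': 6,
-- }
--
-- _EXACT_PRIORITY = {
--     'Wikipedia:Five pillars': 0, 'Wikipedia:What Wikipedia is not': 0,
--     'Wikipedia:Ignore all rules': 3, 'Wikipedia:Be bold': 3,
-- }
--
-- _CATEGORIES = ['Policy', 'Guideline', 'Bot/Automation Policy', 'Essay',
--                'Help/Community Page', 'Administrative Page',
--                'Project/Assessment Page']
--
--
-- def _hits(page_title):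
--     """Priorities of every matching rule: flat keyword index + exact-title index."""
--     title_lower = page_title.lower()
--     hits = [p for kw, p in _KEYWORD_PRIORITY.items() if kw in title_lower]
--     exact = _EXACT_PRIORITY.get(page_title)
--     if exact is not None:
--         hits.append(exact)
--     return hits
--
--
-- def categorize_governance_page(page_title):
--     """Categorize the type of governance page"""
--     hits = _hits(page_title)
--     if not hits:
--         return 'Information Page'
--     return _CATEGORIES[min(hits)]
-- ===== Notes on version B (the rewrite author's own statement) =====
-- stated objective: alternative
-- what changed: Instead of A's first-match if/elif chain, B builds a flat keyword-to-priority index and an exact-title-to-priority index, collects the priorities of ALL matching rules, and returns the category of the minimum priority (default when no rule matches).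
import Mathlib
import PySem

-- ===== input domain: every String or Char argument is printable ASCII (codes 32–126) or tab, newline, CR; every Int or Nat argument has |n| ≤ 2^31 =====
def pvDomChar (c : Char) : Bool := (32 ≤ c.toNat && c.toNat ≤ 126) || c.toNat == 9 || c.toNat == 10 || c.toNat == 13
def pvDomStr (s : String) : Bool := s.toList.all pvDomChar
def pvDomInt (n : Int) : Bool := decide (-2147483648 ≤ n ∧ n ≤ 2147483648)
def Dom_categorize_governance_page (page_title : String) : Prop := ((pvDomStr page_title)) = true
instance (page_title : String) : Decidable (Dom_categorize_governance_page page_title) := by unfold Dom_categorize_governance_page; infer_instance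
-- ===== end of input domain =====

-- B replaces A's first-match if/elif chain by a different algorithm: a flat keyword→priority
-- index and an exact-title→priority index, collecting the priorities of ALL matching rules and
-- returning the category of the minimum priority (alternative; same behaviour).

-- ===== PORT A =====
def categorize_governance_page (page_title : String) : String :=
  let title_lower := PySem.Str.lower page_title
  if PySem.Str.isIn "policy" title_lower
      || (page_title == "Wikipedia:Five pillars" || page_title == "Wikipedia:What Wikipedia is not") then
    "Policy"
  else if PySem.Str.isIn "guideline" title_lower
      || (["manual of style", "reliable sources", "notability"].any fun term => PySem.Str.isIn term title_lower) then
    "Guideline"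
  else if PySem.Str.isIn "bot" title_lower || PySem.Str.isIn "automated" title_lower then
    "Bot/Automation Policy"
  else if PySem.Str.isIn "essay" title_lower
      || (page_title == "Wikipedia:Ignore all rules" || page_title == "Wikipedia:Be bold") then
    "Essay"
  else if ["help", "village pump", "teahouse"].any fun term => PySem.Str.isIn term title_lower then
    "Help/Community Page"
  else if PySem.Str.isIn "arbitration" title_lower || PySem.Str.isIn "administrator" title_lower then
    "Administrative Page"
  else if PySem.Str.isIn "wikiproject" title_lower || PySem.Str.isIn "assessment" title_lower then
    "Project/Assessment Page"
  else
    "Information Page"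

-- ===== PORT B =====
def pvKeywordPriority : List (String × Int) :=
  [("policy", 0),
   ("guideline", 1), ("manual of style", 1), ("reliable sources", 1), ("notability", 1),
   ("bot", 2), ("automated", 2),
   ("essay", 3),
   ("help", 4), ("village pump", 4), ("teahouse", 4),
   ("arbitration", 5), ("administrator", 5),
   ("wikiproject", 6), ("assessment", 6)]

def pvExactPriority : PySem.Dict String Int :=
  PySem.Dict.mk [("Wikipedia:Five pillars", 0), ("Wikipedia:What Wikipedia is not", 0),
                 ("Wikipedia:Ignore all rules", 3), ("Wikipedia:Be bold", 3)]

def pvCategories : List String :=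
  ["Policy", "Guideline", "Bot/Automation Policy", "Essay",
   "Help/Community Page", "Administrative Page", "Project/Assessment Page"]

-- priorities of every matching rule
def pvHits (page_title : String) : List Int :=
  let title_lower := PySem.Str.lower page_title
  let hits := (pvKeywordPriority.filter fun kv => PySem.Str.isIn kv.1 title_lower).map (·.2)
  match PySem.Dict.get? pvExactPriority page_title with
  | some p => hits ++ [p]
  | none => hits

def categorize_governance_page_alt (page_title : String) : String :=
  match PySem.List.min? (pvHits page_title) (fun p => p) with
  | none => "Information Page"
  -- the index is always in range (priorities 0..6), so the .getD default is never used
  | some p => (PySem.List.pyGet? pvCategories p).getD ""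

-- ===== PRECONDITION & SPEC =====
def Spec_categorize_governance_page (page_title : String) (out : String) : Prop := out = categorize_governance_page_alt page_title
instance (page_title : String) (out : String) : Decidable (Spec_categorize_governance_page page_title out) := by unfold Spec_categorize_governance_page; infer_instance

-- ===== CLAIM (what is proved, stated in full; the proofs are below) =====
def Claim_equal_categorize_governance_page : Prop := ∀ (page_title : String), Dom_categorize_governance_page page_title → Spec_categorize_governance_page page_title (categorize_governance_page page_title)

-- ===== LEMMAS AND PROOFS =====

theorem pv_min?_eq_of_int (l : List Int) (p : Int) (hm : p ∈ l) (hle : ∀ b ∈ l, p ≤ b) :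
    PySem.List.min? l (fun x => x) = some p := by
  cases h : PySem.List.min? l (fun x => x) with
  | none =>
    rw [PySem.List.min?_eq_none_iff] at h
    subst h; simp at hm
  | some m =>
    have h1 : m ∈ l := PySem.List.min?_mem h
    have h2 : m ≤ p := PySem.List.min?_isMin h p hm
    have h3 : p ≤ m := hle m h1
    have : m = p := le_antisymm h2 h3
    rw [this]

theorem pv_mem_pvHits (t : String) (b : Int) :
    b ∈ pvHits t ↔
      (∃ kv ∈ pvKeywordPriority, PySem.Str.isIn kv.1 (PySem.Str.lower t) = true ∧ kv.2 = b)
      ∨ PySem.Dict.get? pvExactPriority t = some b := by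
  unfold pvHits
  cases hg : PySem.Dict.get? pvExactPriority t <;>
    simp [hg, List.mem_filter, List.mem_map]
  exact or_congr Iff.rfl eq_comm

theorem pv_get?_exact_cases {t : String} {b : Int}
    (h : PySem.Dict.get? pvExactPriority t = some b) :
    (t = "Wikipedia:Five pillars" ∧ b = 0) ∨ (t = "Wikipedia:What Wikipedia is not" ∧ b = 0)
    ∨ (t = "Wikipedia:Ignore all rules" ∧ b = 3) ∨ (t = "Wikipedia:Be bold" ∧ b = 3) := by
  simp only [pvExactPriority, PySem.Dict.get?_mk_cons] at h
  split_ifs at h with h1 h2 h3 h4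
  · exact Or.inl ⟨(eq_of_beq h1).symm, (Option.some.inj h).symm⟩
  · exact Or.inr (Or.inl ⟨(eq_of_beq h2).symm, (Option.some.inj h).symm⟩)
  · exact Or.inr (Or.inr (Or.inl ⟨(eq_of_beq h3).symm, (Option.some.inj h).symm⟩))
  · exact Or.inr (Or.inr (Or.inr ⟨(eq_of_beq h4).symm, (Option.some.inj h).symm⟩))
  · simp [PySem.Dict.get?] at h

theorem pv_hits_ge0 (t : String) : ∀ b ∈ pvHits t, (0 : Int) ≤ b := by
  intro b hb
  rw [pv_mem_pvHits] at hb
  rcases hb with ⟨kv, hkv, hin, rfl⟩ | hg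
  · simp only [pvKeywordPriority, List.mem_cons, List.not_mem_nil, or_false] at hkv
    rcases hkv with rfl|rfl|rfl|rfl|rfl|rfl|rfl|rfl|rfl|rfl|rfl|rfl|rfl|rfl|rfl <;> decide
  · rcases pv_get?_exact_cases hg with ⟨rfl, rfl⟩|⟨rfl, rfl⟩|⟨rfl, rfl⟩|⟨rfl, rfl⟩ <;> decide

theorem pv_hits_ge1 (t : String)
    (hpol : PySem.Str.isIn "policy" (PySem.Str.lower t) = false)
    (e1 : t ≠ "Wikipedia:Five pillars") (e2 : t ≠ "Wikipedia:What Wikipedia is not") :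
    ∀ b ∈ pvHits t, (1 : Int) ≤ b := by
  intro b hb
  rw [pv_mem_pvHits] at hb
  rcases hb with ⟨kv, hkv, hin, rfl⟩ | hg
  · simp only [pvKeywordPriority, List.mem_cons, List.not_mem_nil, or_false] at hkv
    rcases hkv with rfl|rfl|rfl|rfl|rfl|rfl|rfl|rfl|rfl|rfl|rfl|rfl|rfl|rfl|rfl <;>
      first | simp_all | decide
  · rcases pv_get?_exact_cases hg with ⟨rfl, rfl⟩|⟨rfl, rfl⟩|⟨rfl, rfl⟩|⟨rfl, rfl⟩ <;>
      first | simp_all | decide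

theorem pv_hits_ge2 (t : String)
    (hpol : PySem.Str.isIn "policy" (PySem.Str.lower t) = false)
    (e1 : t ≠ "Wikipedia:Five pillars") (e2 : t ≠ "Wikipedia:What Wikipedia is not")
    (hgl : PySem.Str.isIn "guideline" (PySem.Str.lower t) = false)
    (hmos : PySem.Str.isIn "manual of style" (PySem.Str.lower t) = false)
    (hrs : PySem.Str.isIn "reliable sources" (PySem.Str.lower t) = false)
    (hnot : PySem.Str.isIn "notability" (PySem.Str.lower t) = false) :
    ∀ b ∈ pvHits t, (2 : Int) ≤ b := by
  intro b hb
  rw [pv_mem_pvHits] at hb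
  rcases hb with ⟨kv, hkv, hin, rfl⟩ | hg
  · simp only [pvKeywordPriority, List.mem_cons, List.not_mem_nil, or_false] at hkv
    rcases hkv with rfl|rfl|rfl|rfl|rfl|rfl|rfl|rfl|rfl|rfl|rfl|rfl|rfl|rfl|rfl <;>
      first | simp_all | decide
  · rcases pv_get?_exact_cases hg with ⟨rfl, rfl⟩|⟨rfl, rfl⟩|⟨rfl, rfl⟩|⟨rfl, rfl⟩ <;>
      first | simp_all | decide

theorem pv_hits_ge3 (t : String)
    (hpol : PySem.Str.isIn "policy" (PySem.Str.lower t) = false)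
    (e1 : t ≠ "Wikipedia:Five pillars") (e2 : t ≠ "Wikipedia:What Wikipedia is not")
    (hgl : PySem.Str.isIn "guideline" (PySem.Str.lower t) = false)
    (hmos : PySem.Str.isIn "manual of style" (PySem.Str.lower t) = false)
    (hrs : PySem.Str.isIn "reliable sources" (PySem.Str.lower t) = false)
    (hnot : PySem.Str.isIn "notability" (PySem.Str.lower t) = false)
    (hbot : PySem.Str.isIn "bot" (PySem.Str.lower t) = false)
    (haut : PySem.Str.isIn "automated" (PySem.Str.lower t) = false) :
    ∀ b ∈ pvHits t, (3 : Int) ≤ b := by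
  intro b hb
  rw [pv_mem_pvHits] at hb
  rcases hb with ⟨kv, hkv, hin, rfl⟩ | hg
  · simp only [pvKeywordPriority, List.mem_cons, List.not_mem_nil, or_false] at hkv
    rcases hkv with rfl|rfl|rfl|rfl|rfl|rfl|rfl|rfl|rfl|rfl|rfl|rfl|rfl|rfl|rfl <;>
      first | simp_all | decide
  · rcases pv_get?_exact_cases hg with ⟨rfl, rfl⟩|⟨rfl, rfl⟩|⟨rfl, rfl⟩|⟨rfl, rfl⟩ <;>
      first | simp_all | decide

theorem pv_hits_ge4 (t : String)
    (hpol : PySem.Str.isIn "policy" (PySem.Str.lower t) = false)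
    (e1 : t ≠ "Wikipedia:Five pillars") (e2 : t ≠ "Wikipedia:What Wikipedia is not")
    (hgl : PySem.Str.isIn "guideline" (PySem.Str.lower t) = false)
    (hmos : PySem.Str.isIn "manual of style" (PySem.Str.lower t) = false)
    (hrs : PySem.Str.isIn "reliable sources" (PySem.Str.lower t) = false)
    (hnot : PySem.Str.isIn "notability" (PySem.Str.lower t) = false)
    (hbot : PySem.Str.isIn "bot" (PySem.Str.lower t) = false)
    (haut : PySem.Str.isIn "automated" (PySem.Str.lower t) = false)
    (hess : PySem.Str.isIn "essay" (PySem.Str.lower t) = false)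
    (e3 : t ≠ "Wikipedia:Ignore all rules") (e4 : t ≠ "Wikipedia:Be bold") :
    ∀ b ∈ pvHits t, (4 : Int) ≤ b := by
  intro b hb
  rw [pv_mem_pvHits] at hb
  rcases hb with ⟨kv, hkv, hin, rfl⟩ | hg
  · simp only [pvKeywordPriority, List.mem_cons, List.not_mem_nil, or_false] at hkv
    rcases hkv with rfl|rfl|rfl|rfl|rfl|rfl|rfl|rfl|rfl|rfl|rfl|rfl|rfl|rfl|rfl <;>
      first | simp_all | decide
  · rcases pv_get?_exact_cases hg with ⟨rfl, rfl⟩|⟨rfl, rfl⟩|⟨rfl, rfl⟩|⟨rfl, rfl⟩ <;>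
      first | simp_all | decide

theorem pv_hits_ge5 (t : String)
    (hpol : PySem.Str.isIn "policy" (PySem.Str.lower t) = false)
    (e1 : t ≠ "Wikipedia:Five pillars") (e2 : t ≠ "Wikipedia:What Wikipedia is not")
    (hgl : PySem.Str.isIn "guideline" (PySem.Str.lower t) = false)
    (hmos : PySem.Str.isIn "manual of style" (PySem.Str.lower t) = false)
    (hrs : PySem.Str.isIn "reliable sources" (PySem.Str.lower t) = false)
    (hnot : PySem.Str.isIn "notability" (PySem.Str.lower t) = false)
    (hbot : PySem.Str.isIn "bot" (PySem.Str.lower t) = false)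
    (haut : PySem.Str.isIn "automated" (PySem.Str.lower t) = false)
    (hess : PySem.Str.isIn "essay" (PySem.Str.lower t) = false)
    (e3 : t ≠ "Wikipedia:Ignore all rules") (e4 : t ≠ "Wikipedia:Be bold")
    (hhelp : PySem.Str.isIn "help" (PySem.Str.lower t) = false)
    (hvp : PySem.Str.isIn "village pump" (PySem.Str.lower t) = false)
    (hth : PySem.Str.isIn "teahouse" (PySem.Str.lower t) = false) :
    ∀ b ∈ pvHits t, (5 : Int) ≤ b := by
  intro b hb
  rw [pv_mem_pvHits] at hb
  rcases hb with ⟨kv, hkv, hin, rfl⟩ | hg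
  · simp only [pvKeywordPriority, List.mem_cons, List.not_mem_nil, or_false] at hkv
    rcases hkv with rfl|rfl|rfl|rfl|rfl|rfl|rfl|rfl|rfl|rfl|rfl|rfl|rfl|rfl|rfl <;>
      first | simp_all | decide
  · rcases pv_get?_exact_cases hg with ⟨rfl, rfl⟩|⟨rfl, rfl⟩|⟨rfl, rfl⟩|⟨rfl, rfl⟩ <;>
      first | simp_all | decide

theorem pv_hits_ge6 (t : String)
    (hpol : PySem.Str.isIn "policy" (PySem.Str.lower t) = false)
    (e1 : t ≠ "Wikipedia:Five pillars") (e2 : t ≠ "Wikipedia:What Wikipedia is not")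
    (hgl : PySem.Str.isIn "guideline" (PySem.Str.lower t) = false)
    (hmos : PySem.Str.isIn "manual of style" (PySem.Str.lower t) = false)
    (hrs : PySem.Str.isIn "reliable sources" (PySem.Str.lower t) = false)
    (hnot : PySem.Str.isIn "notability" (PySem.Str.lower t) = false)
    (hbot : PySem.Str.isIn "bot" (PySem.Str.lower t) = false)
    (haut : PySem.Str.isIn "automated" (PySem.Str.lower t) = false)
    (hess : PySem.Str.isIn "essay" (PySem.Str.lower t) = false)
    (e3 : t ≠ "Wikipedia:Ignore all rules") (e4 : t ≠ "Wikipedia:Be bold")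
    (hhelp : PySem.Str.isIn "help" (PySem.Str.lower t) = false)
    (hvp : PySem.Str.isIn "village pump" (PySem.Str.lower t) = false)
    (hth : PySem.Str.isIn "teahouse" (PySem.Str.lower t) = false)
    (harb : PySem.Str.isIn "arbitration" (PySem.Str.lower t) = false)
    (hadm : PySem.Str.isIn "administrator" (PySem.Str.lower t) = false) :
    ∀ b ∈ pvHits t, (6 : Int) ≤ b := by
  intro b hb
  rw [pv_mem_pvHits] at hb
  rcases hb with ⟨kv, hkv, hin, rfl⟩ | hg
  · simp only [pvKeywordPriority, List.mem_cons, List.not_mem_nil, or_false] at hkv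
    rcases hkv with rfl|rfl|rfl|rfl|rfl|rfl|rfl|rfl|rfl|rfl|rfl|rfl|rfl|rfl|rfl <;>
      first | simp_all | decide
  · rcases pv_get?_exact_cases hg with ⟨rfl, rfl⟩|⟨rfl, rfl⟩|⟨rfl, rfl⟩|⟨rfl, rfl⟩ <;>
      first | simp_all | decide

theorem pv_hits_nil (t : String)
    (hpol : PySem.Str.isIn "policy" (PySem.Str.lower t) = false)
    (e1 : t ≠ "Wikipedia:Five pillars") (e2 : t ≠ "Wikipedia:What Wikipedia is not")
    (hgl : PySem.Str.isIn "guideline" (PySem.Str.lower t) = false)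
    (hmos : PySem.Str.isIn "manual of style" (PySem.Str.lower t) = false)
    (hrs : PySem.Str.isIn "reliable sources" (PySem.Str.lower t) = false)
    (hnot : PySem.Str.isIn "notability" (PySem.Str.lower t) = false)
    (hbot : PySem.Str.isIn "bot" (PySem.Str.lower t) = false)
    (haut : PySem.Str.isIn "automated" (PySem.Str.lower t) = false)
    (hess : PySem.Str.isIn "essay" (PySem.Str.lower t) = false)
    (e3 : t ≠ "Wikipedia:Ignore all rules") (e4 : t ≠ "Wikipedia:Be bold")
    (hhelp : PySem.Str.isIn "help" (PySem.Str.lower t) = false)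
    (hvp : PySem.Str.isIn "village pump" (PySem.Str.lower t) = false)
    (hth : PySem.Str.isIn "teahouse" (PySem.Str.lower t) = false)
    (harb : PySem.Str.isIn "arbitration" (PySem.Str.lower t) = false)
    (hadm : PySem.Str.isIn "administrator" (PySem.Str.lower t) = false)
    (hwp : PySem.Str.isIn "wikiproject" (PySem.Str.lower t) = false)
    (hass : PySem.Str.isIn "assessment" (PySem.Str.lower t) = false) :
    pvHits t = [] := by
  rw [List.eq_nil_iff_forall_not_mem]
  intro b hb
  rw [pv_mem_pvHits] at hb
  rcases hb with ⟨kv, hkv, hin, rfl⟩ | hg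
  · simp only [pvKeywordPriority, List.mem_cons, List.not_mem_nil, or_false] at hkv
    rcases hkv with rfl|rfl|rfl|rfl|rfl|rfl|rfl|rfl|rfl|rfl|rfl|rfl|rfl|rfl|rfl <;> simp_all
  · rcases pv_get?_exact_cases hg with ⟨rfl, rfl⟩|⟨rfl, rfl⟩|⟨rfl, rfl⟩|⟨rfl, rfl⟩ <;> simp_all

theorem pv_kw_mem (t : String) (kw : String) (p : Int)
    (hkv : (kw, p) ∈ pvKeywordPriority)
    (hin : PySem.Str.isIn kw (PySem.Str.lower t) = true) : p ∈ pvHits t := by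
  rw [pv_mem_pvHits]
  exact Or.inl ⟨(kw, p), hkv, hin, rfl⟩

theorem pv_alt_of_min (t : String) (p : Int) (c : String)
    (hmin : PySem.List.min? (pvHits t) (fun x => x) = some p)
    (hc : (PySem.List.pyGet? pvCategories p).getD "" = c) :
    categorize_governance_page_alt t = c := by
  unfold categorize_governance_page_alt
  rw [hmin]; exact hc

-- ===== VERDICT (by name: the statement is the Claim_ definition above) =====
theorem categorize_governance_page_spec : Claim_equal_categorize_governance_page := by
  intro t _
  unfold Spec_categorize_governance_page
  by_cases hpol : PySem.Str.isIn "policy" (PySem.Str.lower t) = true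
  · rw [pv_alt_of_min t 0 "Policy"
      (pv_min?_eq_of_int _ _ (pv_kw_mem t "policy" 0 (by decide) hpol)
        (pv_hits_ge0 t)) (by decide)]
    simp only [categorize_governance_page, List.any_cons, List.any_nil, hpol, Bool.true_or, Bool.or_true, Bool.false_or, Bool.or_false, Bool.false_eq_true, Bool.true_eq_false, if_true, if_false, reduceIte]
  rw [Bool.not_eq_true] at hpol
  by_cases e1 : t = "Wikipedia:Five pillars"
  · subst e1; decide
  have e1' : (t == "Wikipedia:Five pillars") = false := by simp [e1]
  by_cases e2 : t = "Wikipedia:What Wikipedia is not"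
  · subst e2; decide
  have e2' : (t == "Wikipedia:What Wikipedia is not") = false := by simp [e2]
  by_cases hgl : PySem.Str.isIn "guideline" (PySem.Str.lower t) = true
  · rw [pv_alt_of_min t 1 "Guideline"
      (pv_min?_eq_of_int _ _ (pv_kw_mem t "guideline" 1 (by decide) hgl)
        (pv_hits_ge1 t hpol e1 e2)) (by decide)]
    simp only [categorize_governance_page, List.any_cons, List.any_nil, hpol, e1', e2', hgl, Bool.true_or, Bool.or_true, Bool.false_or, Bool.or_false, Bool.false_eq_true, Bool.true_eq_false, if_true, if_false, reduceIte]
  rw [Bool.not_eq_true] at hgl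
  by_cases hmos : PySem.Str.isIn "manual of style" (PySem.Str.lower t) = true
  · rw [pv_alt_of_min t 1 "Guideline"
      (pv_min?_eq_of_int _ _ (pv_kw_mem t "manual of style" 1 (by decide) hmos)
        (pv_hits_ge1 t hpol e1 e2)) (by decide)]
    simp only [categorize_governance_page, List.any_cons, List.any_nil, hpol, e1', e2', hgl, hmos, Bool.true_or, Bool.or_true, Bool.false_or, Bool.or_false, Bool.false_eq_true, Bool.true_eq_false, if_true, if_false, reduceIte]
  rw [Bool.not_eq_true] at hmos
  by_cases hrs : PySem.Str.isIn "reliable sources" (PySem.Str.lower t) = true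
  · rw [pv_alt_of_min t 1 "Guideline"
      (pv_min?_eq_of_int _ _ (pv_kw_mem t "reliable sources" 1 (by decide) hrs)
        (pv_hits_ge1 t hpol e1 e2)) (by decide)]
    simp only [categorize_governance_page, List.any_cons, List.any_nil, hpol, e1', e2', hgl, hmos, hrs, Bool.true_or, Bool.or_true, Bool.false_or, Bool.or_false, Bool.false_eq_true, Bool.true_eq_false, if_true, if_false, reduceIte]
  rw [Bool.not_eq_true] at hrs
  by_cases hnot : PySem.Str.isIn "notability" (PySem.Str.lower t) = true
  · rw [pv_alt_of_min t 1 "Guideline"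
      (pv_min?_eq_of_int _ _ (pv_kw_mem t "notability" 1 (by decide) hnot)
        (pv_hits_ge1 t hpol e1 e2)) (by decide)]
    simp only [categorize_governance_page, List.any_cons, List.any_nil, hpol, e1', e2', hgl, hmos, hrs, hnot, Bool.true_or, Bool.or_true, Bool.false_or, Bool.or_false, Bool.false_eq_true, Bool.true_eq_false, if_true, if_false, reduceIte]
  rw [Bool.not_eq_true] at hnot
  by_cases hbot : PySem.Str.isIn "bot" (PySem.Str.lower t) = true
  · rw [pv_alt_of_min t 2 "Bot/Automation Policy"
      (pv_min?_eq_of_int _ _ (pv_kw_mem t "bot" 2 (by decide) hbot)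
        (pv_hits_ge2 t hpol e1 e2 hgl hmos hrs hnot)) (by decide)]
    simp only [categorize_governance_page, List.any_cons, List.any_nil, hpol, e1', e2', hgl, hmos, hrs, hnot, hbot, Bool.true_or, Bool.or_true, Bool.false_or, Bool.or_false, Bool.false_eq_true, Bool.true_eq_false, if_true, if_false, reduceIte]
  rw [Bool.not_eq_true] at hbot
  by_cases haut : PySem.Str.isIn "automated" (PySem.Str.lower t) = true
  · rw [pv_alt_of_min t 2 "Bot/Automation Policy"
      (pv_min?_eq_of_int _ _ (pv_kw_mem t "automated" 2 (by decide) haut)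
        (pv_hits_ge2 t hpol e1 e2 hgl hmos hrs hnot)) (by decide)]
    simp only [categorize_governance_page, List.any_cons, List.any_nil, hpol, e1', e2', hgl, hmos, hrs, hnot, hbot, haut, Bool.true_or, Bool.or_true, Bool.false_or, Bool.or_false, Bool.false_eq_true, Bool.true_eq_false, if_true, if_false, reduceIte]
  rw [Bool.not_eq_true] at haut
  by_cases hess : PySem.Str.isIn "essay" (PySem.Str.lower t) = true
  · rw [pv_alt_of_min t 3 "Essay"
      (pv_min?_eq_of_int _ _ (pv_kw_mem t "essay" 3 (by decide) hess)
        (pv_hits_ge3 t hpol e1 e2 hgl hmos hrs hnot hbot haut)) (by decide)]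
    simp only [categorize_governance_page, List.any_cons, List.any_nil, hpol, e1', e2', hgl, hmos, hrs, hnot, hbot, haut, hess, Bool.true_or, Bool.or_true, Bool.false_or, Bool.or_false, Bool.false_eq_true, Bool.true_eq_false, if_true, if_false, reduceIte]
  rw [Bool.not_eq_true] at hess
  by_cases e3 : t = "Wikipedia:Ignore all rules"
  · subst e3; decide
  have e3' : (t == "Wikipedia:Ignore all rules") = false := by simp [e3]
  by_cases e4 : t = "Wikipedia:Be bold"
  · subst e4; decide
  have e4' : (t == "Wikipedia:Be bold") = false := by simp [e4]
  by_cases hhelp : PySem.Str.isIn "help" (PySem.Str.lower t) = true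
  · rw [pv_alt_of_min t 4 "Help/Community Page"
      (pv_min?_eq_of_int _ _ (pv_kw_mem t "help" 4 (by decide) hhelp)
        (pv_hits_ge4 t hpol e1 e2 hgl hmos hrs hnot hbot haut hess e3 e4)) (by decide)]
    simp only [categorize_governance_page, List.any_cons, List.any_nil, hpol, e1', e2', hgl, hmos, hrs, hnot, hbot, haut, hess, e3', e4', hhelp, Bool.true_or, Bool.or_true, Bool.false_or, Bool.or_false, Bool.false_eq_true, Bool.true_eq_false, if_true, if_false, reduceIte]
  rw [Bool.not_eq_true] at hhelp
  by_cases hvp : PySem.Str.isIn "village pump" (PySem.Str.lower t) = true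
  · rw [pv_alt_of_min t 4 "Help/Community Page"
      (pv_min?_eq_of_int _ _ (pv_kw_mem t "village pump" 4 (by decide) hvp)
        (pv_hits_ge4 t hpol e1 e2 hgl hmos hrs hnot hbot haut hess e3 e4)) (by decide)]
    simp only [categorize_governance_page, List.any_cons, List.any_nil, hpol, e1', e2', hgl, hmos, hrs, hnot, hbot, haut, hess, e3', e4', hhelp, hvp, Bool.true_or, Bool.or_true, Bool.false_or, Bool.or_false, Bool.false_eq_true, Bool.true_eq_false, if_true, if_false, reduceIte]
  rw [Bool.not_eq_true] at hvp
  by_cases hth : PySem.Str.isIn "teahouse" (PySem.Str.lower t) = true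
  · rw [pv_alt_of_min t 4 "Help/Community Page"
      (pv_min?_eq_of_int _ _ (pv_kw_mem t "teahouse" 4 (by decide) hth)
        (pv_hits_ge4 t hpol e1 e2 hgl hmos hrs hnot hbot haut hess e3 e4)) (by decide)]
    simp only [categorize_governance_page, List.any_cons, List.any_nil, hpol, e1', e2', hgl, hmos, hrs, hnot, hbot, haut, hess, e3', e4', hhelp, hvp, hth, Bool.true_or, Bool.or_true, Bool.false_or, Bool.or_false, Bool.false_eq_true, Bool.true_eq_false, if_true, if_false, reduceIte]
  rw [Bool.not_eq_true] at hth
  by_cases harb : PySem.Str.isIn "arbitration" (PySem.Str.lower t) = true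
  · rw [pv_alt_of_min t 5 "Administrative Page"
      (pv_min?_eq_of_int _ _ (pv_kw_mem t "arbitration" 5 (by decide) harb)
        (pv_hits_ge5 t hpol e1 e2 hgl hmos hrs hnot hbot haut hess e3 e4 hhelp hvp hth)) (by decide)]
    simp only [categorize_governance_page, List.any_cons, List.any_nil, hpol, e1', e2', hgl, hmos, hrs, hnot, hbot, haut, hess, e3', e4', hhelp, hvp, hth, harb, Bool.true_or, Bool.or_true, Bool.false_or, Bool.or_false, Bool.false_eq_true, Bool.true_eq_false, if_true, if_false, reduceIte]
  rw [Bool.not_eq_true] at harb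
  by_cases hadm : PySem.Str.isIn "administrator" (PySem.Str.lower t) = true
  · rw [pv_alt_of_min t 5 "Administrative Page"
      (pv_min?_eq_of_int _ _ (pv_kw_mem t "administrator" 5 (by decide) hadm)
        (pv_hits_ge5 t hpol e1 e2 hgl hmos hrs hnot hbot haut hess e3 e4 hhelp hvp hth)) (by decide)]
    simp only [categorize_governance_page, List.any_cons, List.any_nil, hpol, e1', e2', hgl, hmos, hrs, hnot, hbot, haut, hess, e3', e4', hhelp, hvp, hth, harb, hadm, Bool.true_or, Bool.or_true, Bool.false_or, Bool.or_false, Bool.false_eq_true, Bool.true_eq_false, if_true, if_false, reduceIte]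
  rw [Bool.not_eq_true] at hadm
  by_cases hwp : PySem.Str.isIn "wikiproject" (PySem.Str.lower t) = true
  · rw [pv_alt_of_min t 6 "Project/Assessment Page"
      (pv_min?_eq_of_int _ _ (pv_kw_mem t "wikiproject" 6 (by decide) hwp)
        (pv_hits_ge6 t hpol e1 e2 hgl hmos hrs hnot hbot haut hess e3 e4 hhelp hvp hth harb hadm)) (by decide)]
    simp only [categorize_governance_page, List.any_cons, List.any_nil, hpol, e1', e2', hgl, hmos, hrs, hnot, hbot, haut, hess, e3', e4', hhelp, hvp, hth, harb, hadm, hwp, Bool.true_or, Bool.or_true, Bool.false_or, Bool.or_false, Bool.false_eq_true, Bool.true_eq_false, if_true, if_false, reduceIte]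
  rw [Bool.not_eq_true] at hwp
  by_cases hass : PySem.Str.isIn "assessment" (PySem.Str.lower t) = true
  · rw [pv_alt_of_min t 6 "Project/Assessment Page"
      (pv_min?_eq_of_int _ _ (pv_kw_mem t "assessment" 6 (by decide) hass)
        (pv_hits_ge6 t hpol e1 e2 hgl hmos hrs hnot hbot haut hess e3 e4 hhelp hvp hth harb hadm)) (by decide)]
    simp only [categorize_governance_page, List.any_cons, List.any_nil, hpol, e1', e2', hgl, hmos, hrs, hnot, hbot, haut, hess, e3', e4', hhelp, hvp, hth, harb, hadm, hwp, hass, Bool.true_or, Bool.or_true, Bool.false_or, Bool.or_false, Bool.false_eq_true, Bool.true_eq_false, if_true, if_false, reduceIte]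
  rw [Bool.not_eq_true] at hass
  have hnil := pv_hits_nil t hpol e1 e2 hgl hmos hrs hnot hbot haut hess e3 e4 hhelp hvp hth harb hadm hwp hass
  have hB : categorize_governance_page_alt t = "Information Page" := by
    unfold categorize_governance_page_alt
    rw [hnil]
    rfl
  rw [hB]
  simp only [categorize_governance_page, List.any_cons, List.any_nil, hpol, e1', e2', hgl, hmos, hrs, hnot, hbot, haut, hess, e3', e4', hhelp, hvp, hth, harb, hadm, hwp, hass, Bool.true_or, Bool.or_true, Bool.false_or, Bool.or_false, Bool.false_eq_true, Bool.true_eq_false, if_true, if_false, reduceIte]
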